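-- pv_equiv track=rewrite | github.com/mirimSunwoo/CodingTest_programmers | COSPRO_2_goorm/다체 유니폼 맞추기.py | solution
-- ===== SOURCE A (Python) =====
-- def solution(people):
-- 	answer = [0 for _ in range(4)]
-- 	for size in people:
-- 		if size<95:
-- 			answer[0] += 1
-- 			#이상은 자기 자신을 포함, 이하는 내 아래의 숫자를 의미
-- 		elif size>=95 and size<100:
-- 			answer[1] += 1
-- 		elif size>=100 and size<105:
-- 			answer[2] += 1
-- 		elif size>=105:
-- 			answer[3] += 1
-- 	return answer
-- ===== SOURCE B (Python) =====
-- def solution(people):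
--     # cumulative counts below each threshold, then difference into buckets
--     below95 = sum(1 for s in people if s < 95)
--     below100 = sum(1 for s in people if s < 100)
--     below105 = sum(1 for s in people if s < 105)
--     return [below95, below100 - below95, below105 - below100, len(people) - below105]
-- ===== Notes on version B (the rewrite author's own statement) =====
-- stated objective: alternative
-- what changed: Replaced the single pass that dispatches each element into one of four buckets via an if/elif cascade with three cumulative threshold counts over the list whose pairwise differences yield the buckets.
import Mathlib
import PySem

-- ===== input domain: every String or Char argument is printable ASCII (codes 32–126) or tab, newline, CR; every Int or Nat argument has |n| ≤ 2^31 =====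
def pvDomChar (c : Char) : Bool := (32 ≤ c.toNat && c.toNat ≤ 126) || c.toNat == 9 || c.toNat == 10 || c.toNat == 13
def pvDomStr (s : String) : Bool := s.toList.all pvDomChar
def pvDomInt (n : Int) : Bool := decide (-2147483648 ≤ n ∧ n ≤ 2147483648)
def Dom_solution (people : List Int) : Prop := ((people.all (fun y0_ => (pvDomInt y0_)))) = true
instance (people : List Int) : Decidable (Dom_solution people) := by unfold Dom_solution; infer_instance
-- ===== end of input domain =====

-- B replaces A's per-element four-way bucket dispatch with three cumulative
-- threshold counts over the whole list, differenced into the buckets (alternative; same cost).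

-- ===== PORT A =====
-- literal port of A: four-branch if/elif chain incrementing one of four counters
def solution (people : List Int) : List Int :=
  people.foldl (fun answer size =>
    if size < 95 then
      answer.set 0 (answer.getD 0 0 + 1)
    else if size ≥ 95 ∧ size < 100 then
      answer.set 1 (answer.getD 1 0 + 1)
    else if size ≥ 100 ∧ size < 105 then
      answer.set 2 (answer.getD 2 0 + 1)
    else if size ≥ 105 then
      answer.set 3 (answer.getD 3 0 + 1)
    else answer) (List.replicate 4 0)

-- ===== PORT B =====
-- sum(1 for s in people if s < t): a running sum of indicators
def countBelow (people : List Int) (t : Int) : Int :=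
  people.foldl (fun acc s => acc + (if s < t then 1 else 0)) 0

def solution_alt (people : List Int) : List Int :=
  let below95 := countBelow people 95
  let below100 := countBelow people 100
  let below105 := countBelow people 105
  [below95, below100 - below95, below105 - below100, (people.length : Int) - below105]

-- ===== PRECONDITION & SPEC =====
def Spec_solution (people : List Int) (out : List Int) : Prop := out = solution_alt people
instance (people : List Int) (out : List Int) : Decidable (Spec_solution people out) := by unfold Spec_solution; infer_instance

-- ===== CLAIM (what is proved, stated in full; the proofs are below) =====
def Claim_equal_solution : Prop := ∀ (people : List Int), Dom_solution people → Spec_solution people (solution people)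

-- ===== LEMMAS AND PROOFS =====

-- A's fold, started from any 4-element accumulator, adds the four bucket counts
theorem pv_foldA (people : List Int) (a b c d : Int) :
    people.foldl (fun answer size =>
      if size < 95 then
        answer.set 0 (answer.getD 0 0 + 1)
      else if size ≥ 95 ∧ size < 100 then
        answer.set 1 (answer.getD 1 0 + 1)
      else if size ≥ 100 ∧ size < 105 then
        answer.set 2 (answer.getD 2 0 + 1)
      else if size ≥ 105 then
        answer.set 3 (answer.getD 3 0 + 1)
      else answer) [a, b, c, d]
    = [a + ((people.countP (fun s => decide (s < 95))) : Int),
       b + ((people.countP (fun s => decide (95 ≤ s ∧ s < 100))) : Int),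
       c + ((people.countP (fun s => decide (100 ≤ s ∧ s < 105))) : Int),
       d + ((people.countP (fun s => decide (105 ≤ s))) : Int)] := by
  induction people generalizing a b c d with
  | nil => simp
  | cons x xs ih =>
    simp only [List.foldl_cons, List.countP_cons]
    by_cases h1 : x < 95
    · rw [if_pos h1,
        show ([a, b, c, d].set 0 ([a, b, c, d].getD 0 0 + 1)) = [a + 1, b, c, d] from rfl,
        ih, decide_eq_true h1,
        decide_eq_false (show ¬ (95 ≤ x ∧ x < 100) by omega),
        decide_eq_false (show ¬ (100 ≤ x ∧ x < 105) by omega),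
        decide_eq_false (show ¬ (105 ≤ x) by omega)]
      simp only [if_neg Bool.false_ne_true, List.cons.injEq, and_true]
      push_cast; omega
    · by_cases h2 : x ≥ 95 ∧ x < 100
      · rw [if_neg h1, if_pos h2,
          show ([a, b, c, d].set 1 ([a, b, c, d].getD 1 0 + 1)) = [a, b + 1, c, d] from rfl,
          ih, decide_eq_false (show ¬ (x < 95) by omega),
          decide_eq_true (show (95 ≤ x ∧ x < 100) by omega),
          decide_eq_false (show ¬ (100 ≤ x ∧ x < 105) by omega),
          decide_eq_false (show ¬ (105 ≤ x) by omega)]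
        simp only [if_neg Bool.false_ne_true, List.cons.injEq, and_true]
        push_cast; omega
      · by_cases h3 : x ≥ 100 ∧ x < 105
        · rw [if_neg h1, if_neg h2, if_pos h3,
            show ([a, b, c, d].set 2 ([a, b, c, d].getD 2 0 + 1)) = [a, b, c + 1, d] from rfl,
            ih, decide_eq_false (show ¬ (x < 95) by omega),
            decide_eq_false (show ¬ (95 ≤ x ∧ x < 100) by omega),
            decide_eq_true (show (100 ≤ x ∧ x < 105) by omega),
            decide_eq_false (show ¬ (105 ≤ x) by omega)]
          simp only [if_neg Bool.false_ne_true, List.cons.injEq, and_true]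
          push_cast; omega
        · have h4 : x ≥ 105 := by omega
          rw [if_neg h1, if_neg h2, if_neg h3, if_pos h4,
            show ([a, b, c, d].set 3 ([a, b, c, d].getD 3 0 + 1)) = [a, b, c, d + 1] from rfl,
            ih, decide_eq_false (show ¬ (x < 95) by omega),
            decide_eq_false (show ¬ (95 ≤ x ∧ x < 100) by omega),
            decide_eq_false (show ¬ (100 ≤ x ∧ x < 105) by omega),
            decide_eq_true (show (105 ≤ x) by omega)]
          simp only [if_neg Bool.false_ne_true, List.cons.injEq, and_true]
          push_cast; omega

-- B's running indicator sum, from any start, is the count of elements below t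
theorem pv_countBelow (people : List Int) (t z : Int) :
    people.foldl (fun acc s => acc + (if s < t then 1 else 0)) z
    = z + ((people.countP (fun s => decide (s < t))) : Int) := by
  induction people generalizing z with
  | nil => simp
  | cons x xs ih =>
    simp only [List.foldl_cons, List.countP_cons, ih]
    by_cases h : x < t
    · rw [if_pos h, decide_eq_true h]
      simp only [if_pos (rfl : (true : Bool) = true)]
      push_cast; omega
    · rw [if_neg h, decide_eq_false h]
      simp only [if_neg Bool.false_ne_true]
      push_cast; omega

-- splitting a below-count at a lower threshold
theorem pv_split (people : List Int) (lo hi : Int) (h : lo ≤ hi) :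
    ((people.countP (fun s => decide (s < hi))) : Int)
    = ((people.countP (fun s => decide (s < lo))) : Int)
      + ((people.countP (fun s => decide (lo ≤ s ∧ s < hi))) : Int) := by
  induction people with
  | nil => simp
  | cons x xs ih =>
    simp only [List.countP_cons]
    by_cases h1 : x < lo
    · rw [decide_eq_true h1, decide_eq_true (show x < hi by omega),
        decide_eq_false (show ¬ (lo ≤ x ∧ x < hi) by omega)]
      simp only [if_neg Bool.false_ne_true]
      push_cast; omega
    · by_cases h2 : x < hi
      · rw [decide_eq_false h1, decide_eq_true h2,
          decide_eq_true (show (lo ≤ x ∧ x < hi) by omega)]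
        simp only [if_neg Bool.false_ne_true]
        push_cast; omega
      · rw [decide_eq_false h1, decide_eq_false h2,
          decide_eq_false (show ¬ (lo ≤ x ∧ x < hi) by omega)]
        simp only [if_neg Bool.false_ne_true]
        push_cast; omega

-- total length splits at the top threshold
theorem pv_top (people : List Int) :
    (people.length : Int)
    = ((people.countP (fun s => decide (s < 105))) : Int)
      + ((people.countP (fun s => decide (105 ≤ s))) : Int) := by
  induction people with
  | nil => simp
  | cons x xs ih =>
    simp only [List.countP_cons, List.length_cons]
    by_cases h : x < 105
    · rw [decide_eq_true h, decide_eq_false (show ¬ (105 ≤ x) by omega)]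
      simp only [if_neg Bool.false_ne_true]
      push_cast; omega
    · rw [decide_eq_false h, decide_eq_true (show (105 ≤ x) by omega)]
      simp only [if_neg Bool.false_ne_true]
      push_cast; omega

-- ===== VERDICT (by name: the statement is the Claim_ definition above) =====
theorem solution_spec : Claim_equal_solution := by
  intro people _
  unfold Spec_solution
  simp only [solution, solution_alt, countBelow]
  rw [show (List.replicate 4 (0 : Int)) = [0, 0, 0, 0] from rfl, pv_foldA,
    pv_countBelow, pv_countBelow, pv_countBelow]
  have hs1 := pv_split people 95 100 (by norm_num)
  have hs2 := pv_split people 100 105 (by norm_num)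
  have ht := pv_top people
  simp only [List.cons.injEq, true_and, and_true]
  refine ⟨?_, ?_, ?_⟩
  · rw [hs1]; ring
  · rw [hs2]; ring
  · rw [ht]; ring
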